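-- pv_equiv track=rewrite | github.com/soyukke/lean-unsolved | scripts/collatz_dynamics.py | v2_sequence
-- ===== SOURCE A (Python) =====
-- def v2(n):
--     """2-adic valuation"""
--     if n == 0:
--         return float('inf')
--     c = 0
--     while n % 2 == 0:
--         n >>= 1
--         c += 1
--     return c
--
-- def v2_sequence(n, max_steps=10000):
--     """奇数nの軌道でv2(3x+1)の列を返す"""
--     seq = []
--     x = n
--     for _ in range(max_steps):
--         if x == 1:
--             break
--         a = v2(3 * x + 1)
--         seq.append(a)
--         x = (3 * x + 1) >> a
--     return seq
-- ===== SOURCE B (Python) =====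
-- def v2_sequence(n, max_steps=10000):
--     """奇数nの軌道でv2(3x+1)の列を返す"""
--     seq = []
--     x = n
--     steps = 0
--     while steps < max_steps and x != 1:
--         m = 3 * x + 1
--         low = m & -m                      # 2**v2(m), by the classic bit trick
--         seq.append(low.bit_length() - 1)  # v2(m) in O(1), no counting loop
--         x = m // low
--         steps += 1
--     return seq
-- ===== Notes on version B (the rewrite author's own statement) =====
-- stated objective: alternative
-- what changed: The iterative trailing-zero-counting helper v2 is removed: each step computes the 2-adic valuation in closed form as (m & -m).bit_length() - 1 and divides by the extracted power of two, fused into a single while loop.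
import Mathlib
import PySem

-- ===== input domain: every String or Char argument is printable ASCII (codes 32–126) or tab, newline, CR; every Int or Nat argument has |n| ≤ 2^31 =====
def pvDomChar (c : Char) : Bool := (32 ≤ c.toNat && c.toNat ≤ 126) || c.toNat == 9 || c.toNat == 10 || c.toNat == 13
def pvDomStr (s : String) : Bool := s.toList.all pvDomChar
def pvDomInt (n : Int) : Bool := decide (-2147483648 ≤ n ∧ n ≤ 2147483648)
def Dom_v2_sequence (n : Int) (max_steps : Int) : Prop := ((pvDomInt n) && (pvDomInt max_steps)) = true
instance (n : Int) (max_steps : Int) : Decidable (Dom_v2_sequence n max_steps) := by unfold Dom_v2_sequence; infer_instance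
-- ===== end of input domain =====

-- B replaces A's trailing-zero counting helper v2 by the closed-form bit trick
-- (m & -m).bit_length() - 1 fused into a single while loop (objective: alternative).

-- ===== PORT A =====
-- A's helper v2: the while loop, with fuel = bitLength n (enough iterations: v2(n) < bitLength n);
-- each step is exactly Python's `n >>= 1; c += 1`.
def v2A_loop : Nat → Int → Int → Int
  | 0, _, c => c
  | fuel + 1, n, c =>
      if PySem.Int.mod n 2 = 0 then v2A_loop fuel (n >>> (1 : Nat)) (c + 1) else c

-- Python's v2 returns float('inf') at n = 0; that branch is unreachable from v2_sequence
-- (3*x+1 ≠ 0 for every Int x), so the port returns 0 there.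
def v2A (n : Int) : Int :=
  if n = 0 then 0 else v2A_loop (PySem.Int.bitLength n) n 0

-- the `for _ in range(max_steps)` loop with the `x == 1` break
def v2_seq_loop : Nat → Int → List Int → List Int
  | 0, _, seq => seq
  | fuel + 1, x, seq =>
      if x = 1 then seq
      else
        let a := v2A (3 * x + 1)
        v2_seq_loop fuel ((3 * x + 1) >>> a.toNat) (seq ++ [a])

def v2_sequence (n : Int) (max_steps : Int) : List Int :=
  v2_seq_loop max_steps.toNat n []

-- ===== PORT B =====
-- B's while loop: `while steps < max_steps and x != 1`, valuation via (m & -m).bit_length() - 1.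
def v2_alt_loop (max_steps steps x : Int) (seq : List Int) : List Int :=
  if _h : steps < max_steps ∧ x ≠ 1 then
    let m := 3 * x + 1
    let low := PySem.Int.band m (-m)
    v2_alt_loop max_steps (steps + 1) (PySem.Int.floordiv m low)
      (seq ++ [(PySem.Int.bitLength low : Int) - 1])
  else seq
  termination_by (max_steps - steps).toNat
  decreasing_by omega

def v2_sequence_alt (n : Int) (max_steps : Int) : List Int :=
  v2_alt_loop max_steps 0 n []

-- ===== PRECONDITION & SPEC =====
def Spec_v2_sequence (n : Int) (max_steps : Int) (out : List Int) : Prop := out = v2_sequence_alt n max_steps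
instance (n : Int) (max_steps : Int) (out : List Int) : Decidable (Spec_v2_sequence n max_steps out) := by unfold Spec_v2_sequence; infer_instance

-- ===== CLAIM (what is proved, stated in full; the proofs are below) =====
def Claim_equal_v2_sequence : Prop := ∀ (n : Int) (max_steps : Int), Dom_v2_sequence n max_steps → Spec_v2_sequence n max_steps (v2_sequence n max_steps)

-- ===== LEMMAS AND PROOFS =====

-- bit-level facts on Nat
theorem land_bit10 (a b : Nat) : (2 * a + 1) &&& (2 * b) = 2 * (a &&& b) := by
  have := Nat.bitwise_bit (f := and) (by decide) true a false b
  simpa [Nat.bit, Nat.land, two_mul, Nat.mul_comm] using this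

theorem land_bit01 (a b : Nat) : (2 * a) &&& (2 * b + 1) = 2 * (a &&& b) := by
  have := Nat.bitwise_bit (f := and) (by decide) false a true b
  simpa [Nat.bit, Nat.land, two_mul, Nat.mul_comm] using this

-- clearing the lowest set bit: for a = 2^t * o with o odd, a AND (a-1) = a - 2^t
theorem land_pred (t o : Nat) (ho : o % 2 = 1) :
    (2 ^ t * o) &&& (2 ^ t * o - 1) = 2 ^ t * o - 2 ^ t := by
  induction t with
  | zero =>
      obtain ⟨k, rfl⟩ : ∃ k, o = 2 * k + 1 := ⟨o / 2, by omega⟩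
      simpa using land_bit10 k k
  | succ t ih =>
      have h1 : 2 ^ (t + 1) * o = 2 * (2 ^ t * o) := by ring
      have hpos : 0 < 2 ^ t * o := Nat.mul_pos (Nat.two_pow_pos t) (by omega)
      rw [h1]
      have h2 : 2 * (2 ^ t * o) - 1 = 2 * (2 ^ t * o - 1) + 1 := by omega
      rw [h2, land_bit01, ih]
      have hle : 2 ^ t ≤ 2 ^ t * o := Nat.le_mul_of_pos_right _ (by omega)
      rw [pow_succ]
      omega

-- every nonzero Nat is 2^t * o with o odd
theorem exists_odd_decomp : ∀ a : Nat, 0 < a → ∃ t o, o % 2 = 1 ∧ a = 2 ^ t * o := by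
  intro a
  induction a using Nat.strong_induction_on with
  | _ a ih =>
      intro ha
      rcases Nat.even_or_odd a with he | hodd
      · obtain ⟨k, hk⟩ := he
        obtain rfl : a = 2 * k := by omega
        obtain ⟨t, o, ho, hk⟩ := ih k (by omega) (by omega)
        exact ⟨t + 1, o, ho, by rw [hk]; ring⟩
      · exact ⟨0, a, Nat.odd_iff.mp hodd, by simp⟩

-- the bit trick: m & -m = 2^t for m with |m| = 2^t * o, o odd
theorem band_low (m : Int) (t o : Nat) (ho : o % 2 = 1) (habs : m.natAbs = 2 ^ t * o) :
    PySem.Int.band m (-m) = ((2 ^ t : Nat) : Int) := by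
  have hm : m ≠ 0 := by
    intro h; rw [h] at habs; simp at habs
    have := Nat.pos_of_ne_zero (n := o) (by omega)
    omega
  have hle : (2 ^ t : Nat) ≤ 2 ^ t * o := Nat.le_mul_of_pos_right _ (by omega)
  have key : m.natAbs - (m.natAbs &&& (m.natAbs - 1)) = 2 ^ t := by
    rw [habs, land_pred t o ho]
    exact Nat.sub_sub_self hle
  rcases lt_trichotomy m 0 with hneg | hz | hpos
  · have h1 : ¬ (0 ≤ m) := by omega
    have h2 : (0 : Int) ≤ -m := by omega
    have h3 : (-m).toNat = m.natAbs := by clear key habs hle; omega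
    have h4 : (-m - 1).toNat = m.natAbs - 1 := by clear key habs hle; omega
    unfold PySem.Int.band
    rw [if_neg h1, if_pos h2, h3, h4, key]
  · exact absurd hz hm
  · have h1 : (0 : Int) ≤ m := by omega
    have h2 : ¬ ((0 : Int) ≤ -m) := by omega
    have h3 : m.toNat = m.natAbs := by clear key habs hle; omega
    have h4 : (-(-m) - 1).toNat = m.natAbs - 1 := by clear key habs hle; omega
    unfold PySem.Int.band
    rw [if_pos h1, if_neg h2, h3, h4, key]

theorem bitLength_two_pow (t : Nat) :
    PySem.Int.bitLength ((2 ^ t : Nat) : Int) = t + 1 := by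
  induction t with
  | zero => decide
  | succ t ih =>
      rw [PySem.Int.bitLength_natCast (by positivity)]
      have : 2 ^ (t + 1) / 2 = 2 ^ t := by
        rw [pow_succ]; omega
      rw [this, ih]

-- A's v2 while loop counts exactly t on 2^t * o' with o' odd, given enough fuel
theorem v2A_loop_eq (t : Nat) : ∀ (fuel : Nat) (o' c : Int), ¬ (2 ∣ o') → t ≤ fuel →
    v2A_loop fuel (2 ^ t * o') c = c + t := by
  induction t with
  | zero =>
      intro fuel o' c hodd _
      cases fuel with
      | zero => simp [v2A_loop]
      | succ f =>
          have h : ¬ PySem.Int.mod (2 ^ 0 * o') 2 = 0 := by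
            rw [PySem.Int.mod_eq_zero_iff_dvd]; simpa using hodd
          simp only [v2A_loop, if_neg h]
          ring
  | succ t ih =>
      intro fuel o' c hodd hfuel
      cases fuel with
      | zero => omega
      | succ f =>
          have hdvd : PySem.Int.mod (2 ^ (t + 1) * o') 2 = 0 := by
            rw [PySem.Int.mod_eq_zero_iff_dvd, pow_succ]
            exact ⟨2 ^ t * o', by ring⟩
          have hshift : (2 ^ (t + 1) * o') >>> (1 : Nat) = 2 ^ t * o' := by
            rw [Int.shiftRight_eq_div_pow]
            have : (2 ^ (t + 1) * o' : Int) = 2 * (2 ^ t * o') := by ring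
            have h21 : ((2 ^ 1 : Nat) : Int) = 2 := by norm_num
            rw [this, h21]
            exact Int.mul_ediv_cancel_left (2 ^ t * o') two_ne_zero
          rw [v2A_loop, if_pos hdvd, hshift, ih f o' (c + 1) hodd (by omega)]
          push_cast; ring

-- nonzero Int decomposition with matching natAbs decomposition
theorem int_odd_decomp (m : Int) (hm : m ≠ 0) :
    ∃ (t : Nat) (o' : Int), ¬ (2 ∣ o') ∧ m = 2 ^ t * o' ∧
      ∃ o : Nat, o % 2 = 1 ∧ m.natAbs = 2 ^ t * o := by
  obtain ⟨t, o, ho, habs⟩ := exists_odd_decomp m.natAbs (by positivity)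
  have hdvd : ¬ (2 ∣ (o : Int)) := by
    rw [show ((2 : Int)) = ((2 : Nat) : Int) from rfl, Int.natCast_dvd_natCast]
    omega
  rcases lt_trichotomy m 0 with hneg | hz | hpos
  · refine ⟨t, -(o : Int), ?_, ?_, o, ho, habs⟩
    · simpa using hdvd
    · have : m = -(m.natAbs : Int) := by omega
      rw [this, habs]; push_cast; ring
  · exact absurd hz hm
  · refine ⟨t, (o : Int), hdvd, ?_, o, ho, habs⟩
    have : m = (m.natAbs : Int) := by omega
    rw [this, habs]; push_cast; ring

-- A's helper equals t, and both next-x computations equal o'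
theorem v2A_eq (m : Int) (t : Nat) (o' : Int) (hodd : ¬ (2 ∣ o'))
    (hm : m = 2 ^ t * o') (hm0 : m ≠ 0) : v2A m = (t : Int) := by
  have ht : t ≤ PySem.Int.bitLength m := by
    have h1 : 2 ^ t ≤ m.natAbs := by
      have ho1 : o' ≠ 0 := by rintro rfl; simp at hodd
      have : (1 : Nat) ≤ o'.natAbs := by omega
      calc 2 ^ t = 2 ^ t * 1 := by ring
        _ ≤ 2 ^ t * o'.natAbs := Nat.mul_le_mul_left _ this
        _ = m.natAbs := by rw [hm, Int.natAbs_mul]; simp [Int.natAbs_pow]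
    have h2 := PySem.Int.lt_two_pow_bitLength m
    have h3 : 2 ^ t < 2 ^ PySem.Int.bitLength m := lt_of_le_of_lt h1 h2
    exact le_of_lt ((Nat.pow_lt_pow_iff_right (by norm_num)).mp h3)
  rw [hm] at ht
  rw [v2A, if_neg hm0, hm, v2A_loop_eq t _ o' 0 hodd ht]
  ring

theorem ediv_two_pow (t : Nat) (o' : Int) :
    (2 ^ t * o') / ((2 ^ t : Nat) : Int) = o' := by
  push_cast
  exact Int.mul_ediv_cancel_left o' (by positivity)

-- the two loops agree, fuel = (max_steps - steps).toNat
theorem loops_eq : ∀ (fuel : Nat) (ms steps x : Int) (seq : List Int),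
    (ms - steps).toNat = fuel → v2_seq_loop fuel x seq = v2_alt_loop ms steps x seq := by
  intro fuel
  induction fuel with
  | zero =>
      intro ms steps x seq hf
      rw [v2_alt_loop, dif_neg (by omega)]
      rfl
  | succ f ih =>
      intro ms steps x seq hf
      by_cases hx : x = 1
      · rw [v2_alt_loop, dif_neg (by simp [hx])]
        simp [v2_seq_loop, hx]
      · have hm0 : (3 * x + 1 : Int) ≠ 0 := by omega
        obtain ⟨t, o', hodd, hm, o, ho, habs⟩ := int_odd_decomp (3 * x + 1) hm0
        have hband : PySem.Int.band (3 * x + 1) (-(3 * x + 1)) = ((2 ^ t : Nat) : Int) :=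
          band_low _ t o ho habs
        have hva : v2A (3 * x + 1) = (t : Int) := v2A_eq _ t o' hodd hm hm0
        have hshift : (3 * x + 1) >>> ((t : Int)).toNat = o' := by
          rw [Int.toNat_natCast, Int.shiftRight_eq_div_pow, hm]
          exact_mod_cast ediv_two_pow t o'
        have hfd : PySem.Int.floordiv (3 * x + 1) ((2 ^ t : Nat) : Int) = o' := by
          rw [PySem.Int.floordiv_eq_ediv_of_pos (by positivity), hm, ediv_two_pow]
        have hlist : (((t + 1 : Nat) : Int) - 1) = (t : Int) := by push_cast; ring
        rw [v2_seq_loop, if_neg hx, v2_alt_loop, dif_pos ⟨by omega, hx⟩]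
        simp only [hband, hva, bitLength_two_pow, hlist, hshift, hfd]
        exact ih ms (steps + 1) o' _ (by omega)

-- ===== VERDICT (by name: the statement is the Claim_ definition above) =====
theorem v2_sequence_spec : Claim_equal_v2_sequence := by
  intro n max_steps _
  unfold Spec_v2_sequence v2_sequence v2_sequence_alt
  exact loops_eq max_steps.toNat max_steps 0 n [] (by omega)
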